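-- pv_equiv track=rewrite | github.com/DJA-prog/Serial-Gui | App.py | reveal_hidden_characters
-- ===== SOURCE A (Python) =====
-- def reveal_hidden_characters(message: str) -> str:
--     """
--     Replace hidden/whitespace characters with visible symbols
--     so the user can see them in the QTextEdit.
--     Exceptions:
--         - If the string starts with '> ' or '< ', the first space is preserved.
--     """
--     # Check for special cases
--     preserve_prefixes = ("> ", "< ")
--     preserve_first_space = message.startswith(preserve_prefixes)
--
--     replacements = {
--         " ": "·",     # middle dot for space
--         "\t": "→   ", # arrow for tab (plus spacing)
--         "\n": "⏎\n",  # return symbol for newline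
--         "\r": "␍",    # carriage return
--     }
--
--     if preserve_first_space:
--         # Keep prefix as-is, process the rest
--         prefix = message[:2]   # either "> " or "< "
--         rest = message[2:]
--         for hidden, symbol in replacements.items():
--             rest = rest.replace(hidden, symbol)
--         return prefix + rest
--     else:
--         # Normal case — replace everything
--         for hidden, symbol in replacements.items():
--             message = message.replace(hidden, symbol)
--         return message
-- ===== SOURCE B (Python) =====
-- _VISIBLE = {" ": "\u00b7", "\t": "\u2192   ", "\n": "\u23CE\n", "\r": "\u240D"}
--
--
-- def reveal_hidden_characters(message: str) -> str:
--     """Single left-to-right character scan instead of four full replace passes."""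
--     if message.startswith(("> ", "< ")):
--         return message[:2] + "".join(_VISIBLE.get(c, c) for c in message[2:])
--     return "".join(_VISIBLE.get(c, c) for c in message)
-- ===== Notes on version B (the rewrite author's own statement) =====
-- stated objective: simpler
-- what changed: Replaces A's four sequential full-string str.replace passes with a single left-to-right character scan that maps each character through a dict and joins the pieces.
import Mathlib
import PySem

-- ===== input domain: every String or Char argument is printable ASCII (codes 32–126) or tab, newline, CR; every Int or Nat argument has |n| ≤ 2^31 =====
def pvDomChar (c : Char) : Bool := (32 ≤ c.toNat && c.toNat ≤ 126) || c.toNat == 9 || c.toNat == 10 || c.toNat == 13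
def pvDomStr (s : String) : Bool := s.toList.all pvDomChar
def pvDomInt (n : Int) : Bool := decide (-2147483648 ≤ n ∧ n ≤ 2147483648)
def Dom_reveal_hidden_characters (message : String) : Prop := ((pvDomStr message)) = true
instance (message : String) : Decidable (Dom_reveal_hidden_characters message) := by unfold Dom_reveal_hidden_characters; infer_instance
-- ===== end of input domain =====

-- B is a single character scan instead of A's four sequential replace passes (objective: simpler).

-- ===== PORT A =====
def reveal_hidden_characters (message : String) : String :=
  let preserve_first_space :=
    PySem.Str.startswith message "> " || PySem.Str.startswith message "< "
  if preserve_first_space then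
    let pre := PySem.Str.slice message none (some 2)
    let rest := PySem.Str.slice message (some 2) none
    let rest := PySem.Str.replace rest " " "·"
    let rest := PySem.Str.replace rest "\t" "→   "
    let rest := PySem.Str.replace rest "\n" "⏎\n"
    let rest := PySem.Str.replace rest "\r" "␍"
    pre ++ rest
  else
    let message := PySem.Str.replace message " " "·"
    let message := PySem.Str.replace message "\t" "→   "
    let message := PySem.Str.replace message "\n" "⏎\n"
    let message := PySem.Str.replace message "\r" "␍"
    message

-- ===== PORT B =====
-- the dict _VISIBLE with .get(c, c) default, as a per-character function
def rhcVisible (c : Char) : List Char :=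
  if c = ' ' then ['·']
  else if c = '\t' then ['→', ' ', ' ', ' ']
  else if c = '\n' then ['⏎', '\n']
  else if c = '\r' then ['␍']
  else [c]

def reveal_hidden_characters_alt (message : String) : String :=
  if PySem.Str.startswith message "> " || PySem.Str.startswith message "< " then
    String.ofList (PySem.List.slice message.toList none (some 2)
      ++ (PySem.List.slice message.toList (some 2) none).flatMap rhcVisible)
  else
    String.ofList (message.toList.flatMap rhcVisible)

-- ===== PRECONDITION & SPEC =====
def Spec_reveal_hidden_characters (message : String) (out : String) : Prop := out = reveal_hidden_characters_alt message
instance (message : String) (out : String) : Decidable (Spec_reveal_hidden_characters message out) := by unfold Spec_reveal_hidden_characters; infer_instance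

-- ===== CLAIM (what is proved, stated in full; the proofs are below) =====
def Claim_equal_reveal_hidden_characters : Prop := ∀ (message : String), Dom_reveal_hidden_characters message → Spec_reveal_hidden_characters message (reveal_hidden_characters message)

-- ===== LEMMAS AND PROOFS =====

-- replace with a single-character pattern is a flatMap over the characters
theorem replace_go_single (h : Char) (new : List Char) :
    ∀ (l : List Char) (fuel : Nat) (acc : List Char), l.length ≤ fuel →
      PySem.Chars.replace.go [h] new fuel l acc
        = acc.reverse ++ l.flatMap (fun c => if c = h then new else [c]) := by
  intro l
  induction l with
  | nil => intro fuel acc _; cases fuel <;> simp [PySem.Chars.replace.go]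
  | cons c t ih =>
    intro fuel acc hle
    cases fuel with
    | zero => simp at hle
    | succ fuel =>
      by_cases hc : c = h
      · subst hc
        have : [c].isPrefixOf (c :: t) = true := by simp [List.isPrefixOf]
        simp only [PySem.Chars.replace.go, this, if_pos, List.length_cons, List.length_nil,
          List.drop_succ_cons, List.drop_zero]
        rw [ih fuel (new.reverse ++ acc) (by simpa using Nat.le_of_succ_le_succ hle)]
        simp
      · have : [h].isPrefixOf (c :: t) = false := by
          simp [List.isPrefixOf, Ne.symm hc]
        simp only [PySem.Chars.replace.go, this, Bool.false_eq_true, if_neg, not_false_iff]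
        rw [ih fuel (c :: acc) (by simpa using Nat.le_of_succ_le_succ hle)]
        simp [hc]

theorem replace_single (h : Char) (new cs : List Char) :
    PySem.Chars.replace cs [h] new = cs.flatMap (fun c => if c = h then new else [c]) := by
  unfold PySem.Chars.replace
  simp only [List.isEmpty, Bool.false_eq_true, if_neg, not_false_iff]
  simpa using replace_go_single h new cs cs.length [] (Nat.le_refl _)

-- the four sequential single-character replace passes collapse to one scan
theorem four_passes_eq_scan (cs : List Char) :
    PySem.Chars.replace
      (PySem.Chars.replace
        (PySem.Chars.replace
          (PySem.Chars.replace cs [' '] ['·'])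
          ['\t'] ['→', ' ', ' ', ' '])
        ['\n'] ['⏎', '\n'])
      ['\r'] ['␍'] = cs.flatMap rhcVisible := by
  simp only [replace_single, List.flatMap_assoc]
  apply List.flatMap_congr
  intro c _
  by_cases h1 : c = ' '
  · subst h1; decide
  · by_cases h2 : c = '\t'
    · subst h2; decide
    · by_cases h3 : c = '\n'
      · subst h3; decide
      · by_cases h4 : c = '\r'
        · subst h4; decide
        · simp [rhcVisible, h1, h2, h3, h4]

-- ===== VERDICT (by name: the statement is the Claim_ definition above) =====
theorem reveal_hidden_characters_spec : Claim_equal_reveal_hidden_characters := by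
  intro message _
  unfold Spec_reveal_hidden_characters reveal_hidden_characters reveal_hidden_characters_alt
  apply String.toList_inj.mp
  by_cases hpre :
      (PySem.Str.startswith message "> " || PySem.Str.startswith message "< ") = true
  · simp only [hpre, if_pos, String.toList_append, String.toList_ofList,
      PySem.Str.toList_replace, PySem.Str.toList_slice, PySem.Chars.slice_eq_listSlice]
    have := four_passes_eq_scan (PySem.List.slice message.toList (some 2) none)
    simpa using congrArg (PySem.List.slice message.toList none (some 2) ++ ·) this
  · simp only [hpre, Bool.false_eq_true, if_neg, not_false_iff, String.toList_ofList,
      PySem.Str.toList_replace]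
    simpa using four_passes_eq_scan message.toList
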